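-- pv_equiv track=rewrite | github.com/youth4ever/orion | Project EULER/pb214 Totient Chains.py | problem214
-- ===== SOURCE A (Python) =====
-- def problem214(n, chainlength):
--     nums = n*[1]
--     s = 0
--     for p in range(2, n):
--         c = nums[p]
--         if c == 1:  # p is a prime
--             c = nums[p-1] + 1
--             if c == chainlength:
--                 s += p
--             nums[p] = c
--             for i in range(2*p, n, p):  # update phi
--                 nums[i] *= p-1
--                 ii = i // p
--                 while ii % p == 0:
--                     nums[i] *= p
--                     ii //= p
--         else:
--             nums[p] = nums[c] + 1
--     return s
-- ===== SOURCE B (Python) =====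
-- def problem214(n, chainlength):
--     # Pass 1: multiplicative totient sieve into its own array, collecting the primes.
--     phi = n * [1]
--     primes = []
--     for p in range(2, n):
--         if phi[p] == 1:  # untouched by any smaller prime => p is prime
--             primes.append(p)
--             phi[p] = p - 1
--             for i in range(2 * p, n, p):
--                 e, ii = 1, i // p
--                 while ii % p == 0:
--                     e *= p
--                     ii //= p
--                 phi[i] *= (p - 1) * e
--     # Pass 2: chain lengths in a dedicated array (phi[m] < m, so ascending works).
--     chain = n * [1]
--     for m in range(2, n):
--         chain[m] = chain[phi[m]] + 1
--     # Pass 3: sum the primes whose chain has the requested length.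
--     return sum(p for p in primes if chain[p] == chainlength)
-- ===== Notes on version B (the rewrite author's own statement) =====
-- stated objective: alternative
-- what changed: A interleaves totient sieving, chain-length computation and summation in one pass over a single reused array; B separates them into three passes with dedicated structures: a totient sieve (collecting the primes as they are detected), an ascending chain-length pass chain[m]=chain[phi[m]]+1 over a second array, and a final sum over the collected primes.
import Mathlib
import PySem

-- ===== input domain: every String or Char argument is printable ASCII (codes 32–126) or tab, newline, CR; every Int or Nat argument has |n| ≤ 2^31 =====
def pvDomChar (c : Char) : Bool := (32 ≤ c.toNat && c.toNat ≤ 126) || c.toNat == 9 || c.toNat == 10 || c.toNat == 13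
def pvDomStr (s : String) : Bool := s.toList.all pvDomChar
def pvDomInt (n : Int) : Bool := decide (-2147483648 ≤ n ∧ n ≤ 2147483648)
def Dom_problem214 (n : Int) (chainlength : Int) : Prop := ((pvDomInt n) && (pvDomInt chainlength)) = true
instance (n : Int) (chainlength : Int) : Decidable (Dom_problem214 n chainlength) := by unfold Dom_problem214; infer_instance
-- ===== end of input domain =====

-- B replaces A's single interleaved pass over one reused array by three separate passes
-- (totient sieve collecting primes, ascending chain-length pass, final sum); same results.

-- ===== PORT A =====
-- A helper: the inner 'while ii % p == 0: nums[i] *= p; ii //= p' loop of A.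
-- The '2 ≤ p ∧ ii ≠ 0' part of the guard only makes the recursion total; A always
-- reaches this loop with p ≥ 2 and ii ≥ 2, where the guard is exactly 'ii % p == 0'.
def pyMulWhile (p ii : Nat) (x : Int) : Int :=
  if h : 2 ≤ p ∧ ii ≠ 0 ∧ ii % p = 0 then pyMulWhile p (ii / p) (x * p) else x
termination_by ii
decreasing_by exact Nat.div_lt_self (Nat.pos_of_ne_zero h.2.1) h.1

-- Port of A.  The Python list nums (internal mutable state) is a Lean List Int;
-- nums[i] reads become List.getD (every index A reads is in range, so the default is
-- never used), nums[i] = v becomes List.set; 'range(2, n)' / 'range(2*p, n, p)' become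
-- List.range' with the same elements ((N - 2*p + p - 1) / p is len(range(2*p, N, p))).
-- The index nums[c] uses c.toNat: in every execution c is a positive value, as in Python.
def problem214 (n : Int) (chainlength : Int) : Int :=
  let N := n.toNat
  let r := (List.range' 2 (N - 2) 1).foldl
    (fun (st : List Int × Int) p =>
      let nums := st.1
      let c := nums.getD p 1
      if c = 1 then
        let c := nums.getD (p - 1) 1 + 1
        let s := if c = chainlength then st.2 + (p : Int) else st.2
        let nums := nums.set p c
        let nums := (List.range' (2 * p) ((N - 2 * p + p - 1) / p) p).foldl
          (fun l i => l.set i (pyMulWhile p (i / p) (l.getD i 1 * ((p : Int) - 1)))) nums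
        (nums, s)
      else
        (nums.set p (nums.getD c.toNat 1 + 1), st.2))
    (List.replicate N 1, 0)
  r.2

-- ===== PORT B =====
-- B helper: 'e, ii = 1, i // p; while ii % p == 0: e *= p; ii //= p' (e is the accumulator).
-- The '2 ≤ p ∧ ii ≠ 0' part of the guard only makes the recursion total (B: p ≥ 2, ii ≥ 2).
def pyPowAcc (p ii : Nat) (e : Int) : Int :=
  if h : 2 ≤ p ∧ ii ≠ 0 ∧ ii % p = 0 then pyPowAcc p (ii / p) (e * p) else e
termination_by ii
decreasing_by exact Nat.div_lt_self (Nat.pos_of_ne_zero h.2.1) h.1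

-- Port of B (Source B): pass 1 sieves phi (a List Int, reads via getD as in port A) and
-- collects the primes, pass 2 fills the separate chain list ascending, pass 3 sums the
-- collected primes whose chain length is the requested one.
def problem214_alt (n : Int) (chainlength : Int) : Int :=
  let N := n.toNat
  let sieved := (List.range' 2 (N - 2) 1).foldl
    (fun (st : List Int × List Nat) p =>
      if st.1.getD p 1 = 1 then
        let phi := st.1.set p ((p : Int) - 1)
        let phi := (List.range' (2 * p) ((N - 2 * p + p - 1) / p) p).foldl
          (fun l i => l.set i (l.getD i 1 * (((p : Int) - 1) * pyPowAcc p (i / p) 1))) phi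
        (phi, st.2 ++ [p])
      else st)
    (List.replicate N 1, [])
  let phi := sieved.1
  let chain := (List.range' 2 (N - 2) 1).foldl
    (fun l m => l.set m (l.getD ((phi.getD m 1).toNat) 1 + 1)) (List.replicate N 1)
  sieved.2.foldl (fun s p => if chain.getD p 1 = chainlength then s + (p : Int) else s) 0

-- ===== PRECONDITION & SPEC =====
def Spec_problem214 (n : Int) (chainlength : Int) (out : Int) : Prop := out = problem214_alt n chainlength
instance (n : Int) (chainlength : Int) (out : Int) : Decidable (Spec_problem214 n chainlength out) := by unfold Spec_problem214; infer_instance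

-- ===== CLAIM (what is proved, stated in full; the proofs are below) =====
def Claim_equal_problem214 : Prop := ∀ (n : Int) (chainlength : Int), Dom_problem214 n chainlength → Spec_problem214 n chainlength (problem214 n chainlength)

-- ===== LEMMAS AND PROOFS =====

-- The multiplier a prime p contributes to index i in either sieve: (p-1) * p^(v_p(i)-1).
def multI (p i : Nat) : Int := ((p : Int) - 1) * (p : Int) ^ ((i / p).factorization p)

-- One prime's whole inner loop, as a pointwise function.
def sieveStep (N p : Nat) (f : Nat → Int) : Nat → Int :=
  fun i => if p ∣ i ∧ 2 * p ≤ i ∧ i < N then f i * multI p i else f i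

-- The sieve array (indices not yet overwritten by chain values) after outer steps 2..p-1.
def sieveUpTo (N p : Nat) : Nat → Int :=
  (List.range' 2 (p - 2) 1).foldl (fun f q => if q.Prime then sieveStep N q f else f) (fun _ => 1)

-- Reference chain length: chain(m) = chain(φ(m)) + 1 for m ≥ 2, chain(0) = chain(1) = 1.
def chainRef (m : Nat) : Int :=
  if h : 2 ≤ m then chainRef m.totient + 1 else 1
termination_by m
decreasing_by exact Nat.totient_lt _ h

-- Reference running sum after outer steps 2..p-1.
def sumRef (c : Int) (p : Nat) : Int :=
  (List.range' 2 (p - 2) 1).foldl (fun s q => if q.Prime ∧ chainRef q = c then s + (q : Int) else s) 0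

-- Model of A's mixed array after outer steps 2..p-1.
def numsA (N p : Nat) : Nat → Int :=
  fun i => if 1 ≤ i ∧ i < p then chainRef i else sieveUpTo N p i

-- Model of B's phi array after outer steps 2..p-1.
def phiB (N p : Nat) : Nat → Int :=
  fun i => if 2 ≤ i ∧ i < p then (i.totient : Int) else sieveUpTo N p i

-- Model of B's primes list after outer steps 2..p-1.
def primesUpTo (p : Nat) : List Nat :=
  (List.range' 2 (p - 2) 1).filter (fun q => decide q.Prime)

-- Model of B's chain array after chain steps 2..m-1.
def chainB (m : Nat) : Nat → Int :=
  fun i => if 2 ≤ i ∧ i < m then chainRef i else 1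

-- generic invariant rule for foldl over List.range' s k 1
theorem foldl_range'_inv {α : Type} (f : α → Nat → α) (I : Nat → α → Prop) (s k : Nat) (a0 : α)
    (h0 : I s a0) (hs : ∀ p a, s ≤ p → p < s + k → I p a → I (p + 1) (f a p)) :
    I (s + k) ((List.range' s k 1).foldl f a0) := by
  induction k generalizing s a0 with
  | zero => simpa using h0
  | succ k ih =>
    rw [List.range'_succ, List.foldl_cons]
    have h := ih (s + 1) (f a0 s) (hs s a0 le_rfl (by omega) h0)
      (fun p a hp hpk => hs p a (by omega) (by omega))
    have he : s + 1 + k = s + (k + 1) := by omega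
    rwa [he] at h

theorem sieveUpTo_succ (N p : Nat) (hp : 2 ≤ p) :
    sieveUpTo N (p + 1) = if p.Prime then sieveStep N p (sieveUpTo N p) else sieveUpTo N p := by
  unfold sieveUpTo
  have h : p + 1 - 2 = (p - 2) + 1 := by omega
  rw [h, List.range'_concat, List.foldl_append]
  have h2 : 2 + 1 * (p - 2) = p := by omega
  rw [h2]
  simp [List.foldl_cons]

theorem sumRef_succ (c : Int) (p : Nat) (hp : 2 ≤ p) :
    sumRef c (p + 1) = if p.Prime ∧ chainRef p = c then sumRef c p + (p : Int) else sumRef c p := by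
  unfold sumRef
  have h : p + 1 - 2 = (p - 2) + 1 := by omega
  rw [h, List.range'_concat, List.foldl_append]
  have h2 : 2 + 1 * (p - 2) = p := by omega
  rw [h2]
  simp [List.foldl_cons]

theorem primesUpTo_succ (p : Nat) (hp : 2 ≤ p) :
    primesUpTo (p + 1) = if p.Prime then primesUpTo p ++ [p] else primesUpTo p := by
  unfold primesUpTo
  have h : p + 1 - 2 = (p - 2) + 1 := by omega
  rw [h, List.range'_concat]
  have h2 : 2 + 1 * (p - 2) = p := by omega
  rw [h2, List.filter_append]
  by_cases hp : p.Prime <;> simp [hp]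

theorem sieveUpTo_eq_prod (N p i : Nat) :
    sieveUpTo N p i
      = ∏ q ∈ Finset.range p, (if q.Prime ∧ q ∣ i ∧ 2 * q ≤ i ∧ i < N then multI q i else 1) := by
  induction p with
  | zero => simp [sieveUpTo]
  | succ p ih =>
    by_cases h2 : 2 ≤ p
    · rw [sieveUpTo_succ N p h2, Finset.prod_range_succ, ← ih]
      by_cases hp : p.Prime
      · simp only [if_pos hp, sieveStep]
        by_cases hc : p ∣ i ∧ 2 * p ≤ i ∧ i < N
        · rw [if_pos hc, if_pos ⟨hp, hc⟩]
        · rw [if_neg hc, if_neg (fun h => hc h.2), mul_one]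
      · rw [if_neg hp, if_neg (fun h => hp h.1), mul_one]
    · have hz : sieveUpTo N (p + 1) i = 1 := by
        unfold sieveUpTo
        rw [show p + 1 - 2 = 0 from by omega]
        simp
      rw [hz, Finset.prod_eq_one]
      intro q hq
      rw [Finset.mem_range] at hq
      rw [if_neg]
      rintro ⟨hqp, -⟩
      have := hqp.two_le
      omega

-- value still 1 at a prime index (only smaller prime divisors would have touched it)
theorem sieve_prime (N p i : Nat) (hp : i.Prime) : sieveUpTo N p i = 1 := by
  rw [sieveUpTo_eq_prod, Finset.prod_eq_one]
  intro q _
  rw [if_neg]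
  rintro ⟨hqp, hqd, hq2, -⟩
  rcases hp.eq_one_or_self_of_dvd q hqd with h | h
  · exact hqp.one_lt.ne' h
  · subst h
    have := hqp.two_le
    omega

-- at a composite index i ≤ p all prime divisors of i have been processed: the value is φ(i)
theorem sieve_comp (N p i : Nat) (h2 : 2 ≤ i) (hiN : i < N) (hip : i ≤ p) (hc : ¬i.Prime) :
    sieveUpTo N p i = (i.totient : Int) := by
  rw [sieveUpTo_eq_prod]
  have hi0 : i ≠ 0 := by omega
  have hset : (Finset.range p).filter (fun q => q.Prime ∧ q ∣ i ∧ 2 * q ≤ i ∧ i < N)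
      = i.primeFactors := by
    ext q
    simp only [Finset.mem_filter, Finset.mem_range, Nat.mem_primeFactors]
    constructor
    · rintro ⟨-, hqp, hqd, -, -⟩
      exact ⟨hqp, hqd, hi0⟩
    · rintro ⟨hqp, hqd, -⟩
      have hqi : q ≠ i := fun h => hc (h ▸ hqp)
      have hqle : q ≤ i := Nat.le_of_dvd (by omega) hqd
      obtain ⟨m, rfl⟩ := hqd
      have hq2 : 2 ≤ q := hqp.two_le
      have hm : 2 ≤ m := by
        rcases m with _ | _ | m
        · omega
        · simp at hqi
        · omega
      have h2q : 2 * q ≤ q * m := by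
        calc 2 * q = q * 2 := by ring
        _ ≤ q * m := Nat.mul_le_mul_left q hm
      refine ⟨?_, hqp, ⟨m, rfl⟩, h2q, hiN⟩
      have : q < q * m := by nlinarith
      omega
  rw [← Finset.prod_filter, hset]
  rw [Nat.totient_eq_prod_factorization hi0, Finsupp.prod, Nat.support_factorization,
    Nat.cast_prod]
  refine Finset.prod_congr rfl fun q hq => ?_
  have hqp : q.Prime := Nat.prime_of_mem_primeFactors hq
  have hqd : q ∣ i := Nat.dvd_of_mem_primeFactors hq
  have hiq : i / q ≠ 0 := (Nat.div_pos (Nat.le_of_dvd (by omega) hqd) hqp.pos).ne'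
  have hfac : (i / q).factorization q = i.factorization q - 1 := by
    conv_rhs => rw [← Nat.mul_div_cancel' hqd, Nat.factorization_mul hqp.ne_zero hiq]
    simp [hqp.factorization_self]
  rw [Nat.cast_mul, Nat.cast_pow, Nat.cast_sub hqp.one_lt.le, Nat.cast_one, multI, hfac]
  ring

theorem pyMulWhile_eq (p : Nat) (hp : p.Prime) :
    ∀ ii, ii ≠ 0 → ∀ x : Int, pyMulWhile p ii x = x * (p : Int) ^ ii.factorization p := by
  intro ii
  induction ii using Nat.strong_induction_on with
  | _ ii IH =>
    intro hii x
    rw [pyMulWhile]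
    by_cases hd : p ∣ ii
    · have hmod : ii % p = 0 := Nat.mod_eq_zero_of_dvd hd
      rw [dif_pos ⟨hp.two_le, hii, hmod⟩]
      have hiq : ii / p ≠ 0 := by
        have := Nat.le_of_dvd (Nat.pos_of_ne_zero hii) hd
        exact (Nat.div_pos this hp.pos).ne'
      rw [IH (ii / p) (Nat.div_lt_self (Nat.pos_of_ne_zero hii) hp.one_lt) hiq]
      have hfac : ii.factorization p = (ii / p).factorization p + 1 := by
        conv_lhs => rw [← Nat.mul_div_cancel' hd]
        rw [Nat.factorization_mul hp.ne_zero hiq]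
        simp [hp.factorization_self, Nat.add_comm]
      rw [hfac, pow_succ]; ring
    · have hmod : ii % p ≠ 0 := fun h => hd (Nat.dvd_of_mod_eq_zero h)
      rw [dif_neg (by tauto)]
      rw [Nat.factorization_eq_zero_of_not_dvd hd]
      simp

theorem pyPowAcc_eq (p : Nat) (hp : p.Prime) :
    ∀ ii, ii ≠ 0 → ∀ e : Int, pyPowAcc p ii e = e * (p : Int) ^ ii.factorization p := by
  intro ii
  induction ii using Nat.strong_induction_on with
  | _ ii IH =>
    intro hii e
    rw [pyPowAcc]
    by_cases hd : p ∣ ii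
    · have hmod : ii % p = 0 := Nat.mod_eq_zero_of_dvd hd
      rw [dif_pos ⟨hp.two_le, hii, hmod⟩]
      have hiq : ii / p ≠ 0 := by
        have := Nat.le_of_dvd (Nat.pos_of_ne_zero hii) hd
        exact (Nat.div_pos this hp.pos).ne'
      rw [IH (ii / p) (Nat.div_lt_self (Nat.pos_of_ne_zero hii) hp.one_lt) hiq]
      have hfac : ii.factorization p = (ii / p).factorization p + 1 := by
        conv_lhs => rw [← Nat.mul_div_cancel' hd]
        rw [Nat.factorization_mul hp.ne_zero hiq]
        simp [hp.factorization_self, Nat.add_comm]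
      rw [hfac, pow_succ]; ring
    · have hmod : ii % p ≠ 0 := fun h => hd (Nat.dvd_of_mod_eq_zero h)
      rw [dif_neg (by tauto)]
      rw [Nat.factorization_eq_zero_of_not_dvd hd]
      simp

theorem mem_inner_range (N p i : Nat) (hp : 0 < p) :
    i ∈ List.range' (2 * p) ((N - 2 * p + p - 1) / p) p ↔ p ∣ i ∧ 2 * p ≤ i ∧ i < N := by
  rw [List.mem_range']
  constructor
  · rintro ⟨j, hj, rfl⟩
    have hj' : (j + 1) * p ≤ N - 2 * p + p - 1 := (Nat.le_div_iff_mul_le hp).mp hj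
    have hmul : (j + 1) * p = j * p + p := by ring
    have hcomm : p * j = j * p := by ring
    refine ⟨⟨2 + j, by ring⟩, by omega, by omega⟩
  · rintro ⟨⟨m, rfl⟩, h2, hN⟩
    have hm2 : 2 ≤ m := by
      by_contra hlt
      interval_cases m <;> omega
    obtain ⟨k, rfl⟩ : ∃ k, m = k + 2 := ⟨m - 2, by omega⟩
    refine ⟨k, ?_, by ring⟩
    have hk : (k + 1) * p ≤ N - 2 * p + p - 1 := by
      have h1 : p * (k + 2) = k * p + 2 * p := by ring
      have h2' : (k + 1) * p = k * p + p := by ring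
      omega
    exact Nat.lt_of_lt_of_le (Nat.lt_succ_self k) ((Nat.le_div_iff_mul_le hp).mpr hk)

theorem chainRef_two_le (m : Nat) (h : 2 ≤ m) : chainRef m = chainRef m.totient + 1 := by
  rw [chainRef]; simp [h]

theorem chainRef_small (m : Nat) (h : m < 2) : chainRef m = 1 := by
  rw [chainRef, dif_neg (by omega : ¬ 2 ≤ m)]

theorem sieveUpTo_two (N i : Nat) : sieveUpTo N 2 i = 1 := rfl

-- region-selection helpers for the model arrays
theorem nums_at_self (N p : Nat) : numsA N p p = sieveUpTo N p p := by
  unfold numsA; rw [if_neg (by omega)]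

theorem numsA_lo (N p i : Nat) (h1 : 1 ≤ i) (h2 : i < p) : numsA N p i = chainRef i := by
  unfold numsA; rw [if_pos ⟨h1, h2⟩]

theorem numsA_hi (N p i : Nat) (h : ¬(1 ≤ i ∧ i < p)) : numsA N p i = sieveUpTo N p i := by
  unfold numsA; rw [if_neg h]

theorem phiB_at_self (N p : Nat) : phiB N p p = sieveUpTo N p p := by
  unfold phiB; rw [if_neg (by omega)]

theorem phiB_lo (N p i : Nat) (h1 : 2 ≤ i) (h2 : i < p) : phiB N p i = (i.totient : Int) := by
  unfold phiB; rw [if_pos ⟨h1, h2⟩]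

theorem phiB_hi (N p i : Nat) (h : ¬(2 ≤ i ∧ i < p)) : phiB N p i = sieveUpTo N p i := by
  unfold phiB; rw [if_neg h]

theorem chainB_lo (m i : Nat) (h1 : 2 ≤ i) (h2 : i < m) : chainB m i = chainRef i := by
  unfold chainB; rw [if_pos ⟨h1, h2⟩]

theorem chainB_hi (m i : Nat) (h : ¬(2 ≤ i ∧ i < m)) : chainB m i = 1 := by
  unfold chainB; rw [if_neg h]

theorem totient_cast_ne_one (p : Nat) (h2 : 2 ≤ p) (hp : ¬p.Prime) : (p.totient : Int) ≠ 1 := by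
  rw [ne_eq, show (1 : Int) = ((1 : Nat) : Int) from rfl, Nat.cast_inj, Nat.totient_eq_one_iff]
  rintro (h | h)
  · omega
  · exact hp (h ▸ Nat.prime_two)

-- list-update lemmas (the state lists)
theorem getD_set (l : List Int) (j : Nat) (v : Int) (i : Nat) (d : Int) :
    (l.set j v).getD i d = if i = j ∧ j < l.length then v else l.getD i d := by
  rw [List.getD_eq_getElem?_getD, List.getD_eq_getElem?_getD, List.getElem?_set]
  by_cases h : i = j
  · subst h
    by_cases hl : i < l.length <;> simp [hl]
  · rw [if_neg (fun hh => h hh.symm), if_neg (fun hh => h hh.1)]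

theorem getD_replicate (n i : Nat) (d : Int) :
    (List.replicate n (1 : Int)).getD i d = if i < n then 1 else d := by
  rw [List.getD_eq_getElem?_getD, List.getElem?_replicate]
  by_cases h : i < n <;> simp [h]

theorem foldl_set_len (step : List Int → Nat → List Int)
    (hstep : ∀ l i, (step l i).length = l.length) :
    ∀ (L : List Nat) (l : List Int), (L.foldl step l).length = l.length := by
  intro L
  induction L with
  | nil => intro l; rfl
  | cons a L ih => intro l; rw [List.foldl_cons, ih, hstep]

theorem foldl_set_getD (g : Nat → Int → Int) (step : List Int → Nat → List Int)
    (hstep : ∀ l i, step l i = l.set i (g i (l.getD i 1))) :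
    ∀ (L : List Nat), L.Nodup → ∀ (l : List Int) (i : Nat),
      (L.foldl step l).getD i 1
        = if i ∈ L ∧ i < l.length then g i (l.getD i 1) else l.getD i 1 := by
  intro L
  induction L with
  | nil => intro _ l i; simp
  | cons a L ih =>
    intro hnd l i
    have ha : a ∉ L := (List.nodup_cons.mp hnd).1
    rw [List.foldl_cons, hstep, ih (List.nodup_cons.mp hnd).2, List.length_set]
    have hget : (l.set a (g a (l.getD a 1))).getD i 1
        = if i = a ∧ a < l.length then g a (l.getD a 1) else l.getD i 1 := getD_set l a _ i 1
    by_cases hia : i = a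
    · subst hia
      rw [if_neg (fun hh => ha hh.1), hget]
      by_cases hal : i < l.length
      · rw [if_pos ⟨rfl, hal⟩, if_pos ⟨List.mem_cons_self, hal⟩]
      · rw [if_neg (fun hh => hal hh.2), if_neg (fun hh => hal hh.2)]
    · have hg2 : (l.set a (g a (l.getD a 1))).getD i 1 = l.getD i 1 := by
        rw [hget, if_neg (fun hh => hia hh.1)]
      rw [hg2]
      by_cases hiL : i ∈ L
      · by_cases hil : i < l.length
        · rw [if_pos ⟨hiL, hil⟩, if_pos ⟨List.mem_cons_of_mem a hiL, hil⟩]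
        · rw [if_neg (fun hh => hil hh.2), if_neg (fun hh => hil hh.2)]
      · rw [if_neg (fun hh => hiL hh.1),
          if_neg (fun hh => (List.mem_cons.mp hh.1).elim (fun h3 => hia h3) (fun h3 => hiL h3))]

-- A's inner sieve loop, pointwise
theorem innerFoldA (N p : Nat) (hp : p.Prime) (l : List Int) (hl : l.length = N) (i : Nat) :
    ((List.range' (2 * p) ((N - 2 * p + p - 1) / p) p).foldl
        (fun l i => l.set i (pyMulWhile p (i / p) (l.getD i 1 * ((p : Int) - 1)))) l).getD i 1
      = if p ∣ i ∧ 2 * p ≤ i ∧ i < N then l.getD i 1 * multI p i else l.getD i 1 := by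
  rw [foldl_set_getD (fun i x => pyMulWhile p (i / p) (x * ((p : Int) - 1))) _
    (fun l i => rfl) _ (List.nodup_range' p hp.pos) l i]
  by_cases hc : p ∣ i ∧ 2 * p ≤ i ∧ i < N
  · rw [if_pos ⟨(mem_inner_range N p i hp.pos).mpr hc, hl ▸ hc.2.2⟩, if_pos hc]
    have hine : i / p ≠ 0 := by
      have : 2 ≤ i / p := (Nat.le_div_iff_mul_le hp.pos).mpr (by omega)
      omega
    rw [pyMulWhile_eq p hp (i / p) hine, multI]
    ring
  · rw [if_neg (fun hm => hc ((mem_inner_range N p i hp.pos).mp hm.1)), if_neg hc]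

-- B's inner sieve loop, pointwise (same multiplier, accumulated separately)
theorem innerFoldB (N p : Nat) (hp : p.Prime) (l : List Int) (hl : l.length = N) (i : Nat) :
    ((List.range' (2 * p) ((N - 2 * p + p - 1) / p) p).foldl
        (fun l i => l.set i (l.getD i 1 * (((p : Int) - 1) * pyPowAcc p (i / p) 1))) l).getD i 1
      = if p ∣ i ∧ 2 * p ≤ i ∧ i < N then l.getD i 1 * multI p i else l.getD i 1 := by
  rw [foldl_set_getD (fun i x => x * (((p : Int) - 1) * pyPowAcc p (i / p) 1)) _
    (fun l i => rfl) _ (List.nodup_range' p hp.pos) l i]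
  by_cases hc : p ∣ i ∧ 2 * p ≤ i ∧ i < N
  · rw [if_pos ⟨(mem_inner_range N p i hp.pos).mpr hc, hl ▸ hc.2.2⟩, if_pos hc]
    have hine : i / p ≠ 0 := by
      have : 2 ≤ i / p := (Nat.le_div_iff_mul_le hp.pos).mpr (by omega)
      omega
    rw [pyPowAcc_eq p hp (i / p) hine, multI]
    ring
  · rw [if_neg (fun hm => hc ((mem_inner_range N p i hp.pos).mp hm.1)), if_neg hc]

-- the loop invariants: the concrete list states realize the model arrays
def ModelsA (N : Nat) (c : Int) (p : Nat) (st : List Int × Int) : Prop :=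
  st.1.length = N ∧ (∀ i, st.1.getD i 1 = numsA N p i) ∧ st.2 = sumRef c p

def ModelsB (N p : Nat) (st : List Int × List Nat) : Prop :=
  st.1.length = N ∧ (∀ i, st.1.getD i 1 = phiB N p i) ∧ st.2 = primesUpTo p

-- A's outer step preserves the invariant (reduced form of the port's loop body)
theorem stepA_eq (N : Nat) (c : Int) (p : Nat) (h2 : 2 ≤ p) (hN : p < N)
    (st : List Int × Int) (h : ModelsA N c p st) :
    ModelsA N c (p + 1)
      (if st.1.getD p 1 = 1 then
        ((List.range' (2 * p) ((N - 2 * p + p - 1) / p) p).foldl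
            (fun l i => l.set i (pyMulWhile p (i / p) (l.getD i 1 * ((p : Int) - 1))))
            (st.1.set p (st.1.getD (p - 1) 1 + 1)),
         if st.1.getD (p - 1) 1 + 1 = c then st.2 + (p : Int) else st.2)
      else
        (st.1.set p (st.1.getD (st.1.getD p 1).toNat 1 + 1), st.2)) := by
  obtain ⟨hlen, hm, hsum⟩ := h
  have hval : st.1.getD p 1 = sieveUpTo N p p := by rw [hm p, nums_at_self]
  have hpm1 : st.1.getD (p - 1) 1 = chainRef (p - 1) := by
    rw [hm (p - 1), numsA_lo N p (p - 1) (by omega) (by omega)]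
  by_cases hp : p.Prime
  · have h1 : st.1.getD p 1 = 1 := by rw [hval]; exact sieve_prime N p p hp
    rw [if_pos h1]
    have hchain : chainRef (p - 1) + 1 = chainRef p := by
      rw [chainRef_two_le p h2, Nat.totient_prime hp]
    have hlen' : (st.1.set p (st.1.getD (p - 1) 1 + 1)).length = N := by
      rw [List.length_set]; exact hlen
    have hsget : ∀ i, (st.1.set p (st.1.getD (p - 1) 1 + 1)).getD i 1
        = if i = p ∧ p < st.1.length then st.1.getD (p - 1) 1 + 1 else st.1.getD i 1 :=
      fun i => getD_set st.1 p _ i 1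
    refine ⟨by rw [foldl_set_len _ (fun l i => List.length_set ..)]; exact hlen', fun i => ?_, ?_⟩
    · rw [innerFoldA N p hp _ hlen' i]
      have hs : sieveUpTo N (p + 1) = sieveStep N p (sieveUpTo N p) := by
        rw [sieveUpTo_succ N p h2, if_pos hp]
      by_cases hcnd : p ∣ i ∧ 2 * p ≤ i ∧ i < N
      · have hneq : i ≠ p := by omega
        rw [if_pos hcnd, hsget i, if_neg (fun hh => hneq hh.1), hm i,
          numsA_hi N p i (by omega), numsA_hi N (p + 1) i (by omega), hs]
        simp only [sieveStep]
        rw [if_pos hcnd]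
      · rw [if_neg hcnd, hsget i]
        by_cases hip : i = p
        · rw [if_pos ⟨hip, hlen ▸ hN⟩, hpm1, hchain, hip,
            numsA_lo N (p + 1) p (by omega) (by omega)]
        · rw [if_neg (fun hh => hip hh.1), hm i]
          by_cases hlt : 1 ≤ i ∧ i < p
          · rw [numsA_lo N p i hlt.1 hlt.2, numsA_lo N (p + 1) i hlt.1 (by omega)]
          · rw [numsA_hi N p i hlt, numsA_hi N (p + 1) i (fun hh => hlt ⟨hh.1, by omega⟩), hs]
            simp only [sieveStep]
            rw [if_neg hcnd]
    · rw [hpm1, hchain, hsum, sumRef_succ c p h2]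
      simp [hp]
  · have hvc : st.1.getD p 1 = (p.totient : Int) := by
      rw [hval]; exact sieve_comp N p p h2 hN le_rfl hp
    rw [hvc, if_neg (totient_cast_ne_one p h2 hp)]
    have hφlt : p.totient < p := Nat.totient_lt p (by omega)
    have hφpos : 0 < p.totient := Nat.totient_pos.mpr (by omega)
    have hrd : st.1.getD ((p.totient : Int).toNat) 1 = chainRef p.totient := by
      rw [Int.toNat_natCast, hm p.totient, numsA_lo N p p.totient (by omega) hφlt]
    have hs : sieveUpTo N (p + 1) = sieveUpTo N p := by
      rw [sieveUpTo_succ N p h2, if_neg hp]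
    refine ⟨by rw [List.length_set]; exact hlen, fun i => ?_, ?_⟩
    · rw [getD_set, hrd, ← chainRef_two_le p h2]
      by_cases hip : i = p
      · rw [if_pos ⟨hip, hlen ▸ hN⟩, hip, numsA_lo N (p + 1) p (by omega) (by omega)]
      · rw [if_neg (fun hh => hip hh.1), hm i]
        by_cases hlt : 1 ≤ i ∧ i < p
        · rw [numsA_lo N p i hlt.1 hlt.2, numsA_lo N (p + 1) i hlt.1 (by omega)]
        · rw [numsA_hi N p i hlt, numsA_hi N (p + 1) i (fun hh => hlt ⟨hh.1, by omega⟩), hs]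
    · rw [hsum, sumRef_succ c p h2, if_neg (by simp [hp])]

theorem portA_eq (n : Int) (c : Int) :
    problem214 n c = sumRef c (2 + (n.toNat - 2)) := by
  refine (foldl_range'_inv
    (f := fun (st : List Int × Int) p =>
      if st.1.getD p 1 = 1 then
        ((List.range' (2 * p) ((n.toNat - 2 * p + p - 1) / p) p).foldl
            (fun l i => l.set i (pyMulWhile p (i / p) (l.getD i 1 * ((p : Int) - 1))))
            (st.1.set p (st.1.getD (p - 1) 1 + 1)),
         if st.1.getD (p - 1) 1 + 1 = c then st.2 + (p : Int) else st.2)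
      else
        (st.1.set p (st.1.getD (st.1.getD p 1).toNat 1 + 1), st.2))
    (I := fun p st => ModelsA n.toNat c p st) (s := 2) (k := n.toNat - 2)
    (a0 := (List.replicate n.toNat 1, (0 : Int))) ?_ ?_).2.2
  · refine ⟨List.length_replicate, fun i => ?_, by unfold sumRef; simp⟩
    rw [getD_replicate, ite_self]
    by_cases hi : 1 ≤ i ∧ i < 2
    · rw [numsA_lo _ _ _ hi.1 hi.2, chainRef_small i (by omega)]
    · rw [numsA_hi _ _ _ hi, sieveUpTo_two]
  · intro p st hp hpk hst
    exact stepA_eq n.toNat c p hp (by omega) st hst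

-- B's pass-1 step preserves the invariant (reduced form of the port's loop body)
theorem stepB_eq (N : Nat) (p : Nat) (h2 : 2 ≤ p) (hN : p < N)
    (st : List Int × List Nat) (h : ModelsB N p st) :
    ModelsB N (p + 1)
      (if st.1.getD p 1 = 1 then
        ((List.range' (2 * p) ((N - 2 * p + p - 1) / p) p).foldl
            (fun l i => l.set i (l.getD i 1 * (((p : Int) - 1) * pyPowAcc p (i / p) 1)))
            (st.1.set p ((p : Int) - 1)),
         st.2 ++ [p])
      else st) := by
  obtain ⟨hlen, hm, hprimes⟩ := h
  have hval : st.1.getD p 1 = sieveUpTo N p p := by rw [hm p, phiB_at_self]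
  by_cases hp : p.Prime
  · have h1 : st.1.getD p 1 = 1 := by rw [hval]; exact sieve_prime N p p hp
    rw [if_pos h1]
    have hcast : ((p : Int) - 1) = (p.totient : Int) := by
      rw [Nat.totient_prime hp, Nat.cast_sub hp.one_lt.le, Nat.cast_one]
    have hlen' : (st.1.set p ((p : Int) - 1)).length = N := by
      rw [List.length_set]; exact hlen
    have hsget : ∀ i, (st.1.set p ((p : Int) - 1)).getD i 1
        = if i = p ∧ p < st.1.length then ((p : Int) - 1) else st.1.getD i 1 :=
      fun i => getD_set st.1 p _ i 1
    refine ⟨by rw [foldl_set_len _ (fun l i => List.length_set ..)]; exact hlen', fun i => ?_, ?_⟩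
    · rw [innerFoldB N p hp _ hlen' i]
      have hs : sieveUpTo N (p + 1) = sieveStep N p (sieveUpTo N p) := by
        rw [sieveUpTo_succ N p h2, if_pos hp]
      by_cases hcnd : p ∣ i ∧ 2 * p ≤ i ∧ i < N
      · have hneq : i ≠ p := by omega
        rw [if_pos hcnd, hsget i, if_neg (fun hh => hneq hh.1), hm i,
          phiB_hi N p i (by omega), phiB_hi N (p + 1) i (by omega), hs]
        simp only [sieveStep]
        rw [if_pos hcnd]
      · rw [if_neg hcnd, hsget i]
        by_cases hip : i = p
        · rw [if_pos ⟨hip, hlen ▸ hN⟩, hip, phiB_lo N (p + 1) p h2 (by omega), hcast]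
        · rw [if_neg (fun hh => hip hh.1), hm i]
          by_cases hlt : 2 ≤ i ∧ i < p
          · rw [phiB_lo N p i hlt.1 hlt.2, phiB_lo N (p + 1) i hlt.1 (by omega)]
          · rw [phiB_hi N p i hlt, phiB_hi N (p + 1) i (fun hh => hlt ⟨hh.1, by omega⟩), hs]
            simp only [sieveStep]
            rw [if_neg hcnd]
    · rw [hprimes, primesUpTo_succ p h2, if_pos hp]
  · have hvc : st.1.getD p 1 = (p.totient : Int) := by
      rw [hval]; exact sieve_comp N p p h2 hN le_rfl hp
    rw [hvc, if_neg (totient_cast_ne_one p h2 hp)]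
    have hs : sieveUpTo N (p + 1) = sieveUpTo N p := by
      rw [sieveUpTo_succ N p h2, if_neg hp]
    refine ⟨hlen, fun i => ?_, by rw [hprimes, primesUpTo_succ p h2, if_neg hp]⟩
    rw [hm i]
    by_cases hip : i = p
    · rw [hip, phiB_at_self, phiB_lo N (p + 1) p h2 (by omega)]
      exact sieve_comp N p p h2 hN le_rfl hp
    · by_cases hlt : 2 ≤ i ∧ i < p
      · rw [phiB_lo N p i hlt.1 hlt.2, phiB_lo N (p + 1) i hlt.1 (by omega)]
      · rw [phiB_hi N p i hlt, phiB_hi N (p + 1) i (fun hh => hlt ⟨hh.1, by omega⟩), hs]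

-- B's pass 2 (dedicated chain list) computes chainRef on [2, 2 + (N - 2))
theorem chainFoldL (N : Nat) (phi : List Int)
    (hphi : ∀ m, phi.getD m 1 = phiB N (2 + (N - 2)) m) (i : Nat) :
    ((List.range' 2 (N - 2) 1).foldl
        (fun l m => l.set m (l.getD ((phi.getD m 1).toNat) 1 + 1))
        (List.replicate N 1)).getD i 1 = chainB (2 + (N - 2)) i := by
  refine (foldl_range'_inv
    (f := fun l m => l.set m (l.getD ((phi.getD m 1).toNat) 1 + 1))
    (I := fun m l => l.length = N ∧ ∀ i, l.getD i 1 = chainB m i) (s := 2) (k := N - 2)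
    (a0 := List.replicate N 1) ?_ ?_).2 i
  · refine ⟨List.length_replicate, fun i => ?_⟩
    rw [getD_replicate, ite_self, chainB_hi 2 i (by omega)]
  · rintro m l hm2 hmP ⟨hlen, hptw⟩
    have hmN : m < N := by omega
    have hv : l.getD ((phi.getD m 1).toNat) 1 + 1 = chainRef m := by
      rw [hphi m, phiB_lo N _ m hm2 hmP, Int.toNat_natCast, hptw]
      have hlt : m.totient < m := Nat.totient_lt m (by omega)
      have hpos : 0 < m.totient := Nat.totient_pos.mpr (by omega)
      have hcv : chainB m m.totient = chainRef m.totient := by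
        by_cases hh : 2 ≤ m.totient
        · exact chainB_lo m m.totient hh hlt
        · rw [chainB_hi m m.totient (fun h3 => hh h3.1), chainRef_small _ (by omega)]
      rw [hcv, ← chainRef_two_le m hm2]
    refine ⟨by rw [List.length_set]; exact hlen, fun i => ?_⟩
    rw [getD_set, hv]
    by_cases him : i = m
    · rw [if_pos ⟨him, hlen ▸ hmN⟩, him, chainB_lo (m + 1) m hm2 (by omega)]
    · rw [if_neg (fun hh => him hh.1), hptw i]
      by_cases hr : 2 ≤ i ∧ i < m
      · rw [chainB_lo m i hr.1 hr.2, chainB_lo (m + 1) i hr.1 (by omega)]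
      · rw [chainB_hi m i hr, chainB_hi (m + 1) i (fun hh => hr ⟨hh.1, by omega⟩)]

-- summing over the collected primes with a correct chain table = A's guarded running sum
theorem sumFold_eq (c : Int) :
    ∀ (L : List Nat) (F : Nat → Int), (∀ q ∈ L, q.Prime → F q = chainRef q) → ∀ s : Int,
      (L.filter (fun q => decide q.Prime)).foldl (fun s q => if F q = c then s + (q : Int) else s) s
        = L.foldl (fun s q => if q.Prime ∧ chainRef q = c then s + (q : Int) else s) s := by
  intro L
  induction L with
  | nil => intro F _ s; simp
  | cons a L ih =>
    intro F hF s
    by_cases ha : a.Prime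
    · rw [List.filter_cons_of_pos (by simpa using ha), List.foldl_cons, List.foldl_cons,
        hF a List.mem_cons_self ha]
      have hinit : (if a.Prime ∧ chainRef a = c then s + (a : Int) else s)
          = (if chainRef a = c then s + (a : Int) else s) := by simp [ha]
      rw [hinit]
      exact ih F (fun q hq => hF q (List.mem_cons_of_mem a hq)) _
    · rw [List.filter_cons_of_neg (by simpa using ha), List.foldl_cons,
        if_neg (by simp [ha])]
      exact ih F (fun q hq => hF q (List.mem_cons_of_mem a hq)) s

-- B's passes 2 and 3, given any pass-1 result realizing the model
theorem passB23 (N : Nat) (c : Int) (st : List Int × List Nat)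
    (h : ModelsB N (2 + (N - 2)) st) :
    st.2.foldl (fun s p =>
      if ((List.range' 2 (N - 2) 1).foldl
            (fun l m => l.set m (l.getD ((st.1.getD m 1).toNat) 1 + 1))
            (List.replicate N 1)).getD p 1 = c then s + (p : Int) else s) 0
      = sumRef c (2 + (N - 2)) := by
  obtain ⟨hlen, hphi, hprimes⟩ := h
  have hchain := chainFoldL N st.1 hphi
  rw [hprimes]
  unfold primesUpTo sumRef
  rw [show 2 + (N - 2) - 2 = N - 2 from by omega]
  refine sumFold_eq c (List.range' 2 (N - 2) 1) _ (fun q hq _ => ?_) 0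
  rw [List.mem_range'] at hq
  obtain ⟨j, hj, rfl⟩ := hq
  rw [hchain]
  exact chainB_lo _ _ (by omega) (by omega)

theorem portB_eq (n : Int) (c : Int) :
    problem214_alt n c = sumRef c (2 + (n.toNat - 2)) := by
  refine passB23 n.toNat c _ (foldl_range'_inv
    (f := fun (st : List Int × List Nat) p =>
      if st.1.getD p 1 = 1 then
        ((List.range' (2 * p) ((n.toNat - 2 * p + p - 1) / p) p).foldl
            (fun l i => l.set i (l.getD i 1 * (((p : Int) - 1) * pyPowAcc p (i / p) 1)))
            (st.1.set p ((p : Int) - 1)),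
         st.2 ++ [p])
      else st)
    (I := fun p st => ModelsB n.toNat p st) (s := 2) (k := n.toNat - 2)
    (a0 := (List.replicate n.toNat 1, ([] : List Nat))) ?_ ?_)
  · refine ⟨List.length_replicate, fun i => ?_, by unfold primesUpTo; simp⟩
    rw [getD_replicate, ite_self, phiB_hi _ _ _ (by omega), sieveUpTo_two]
  · intro p st hp hpk hst
    exact stepB_eq n.toNat p hp (by omega) st hst

-- ===== VERDICT (by name: the statement is the Claim_ definition above) =====
theorem problem214_spec : Claim_equal_problem214 := by
  intro n c _
  unfold Spec_problem214
  rw [portA_eq, portB_eq]
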